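-- pv_equiv track=rewrite | github.com/Yooncoding/solved | BOJ/python/10816.py | solution
-- ===== SOURCE A (Python) =====
-- def solution(card, check):
--     collection = dict()
--     for i in check:
--         collection[i] = 0
--     for j in card:
--         if j in collection:
--             collection[j] += 1
--     return collection
-- ===== SOURCE B (Python) =====
-- def solution(card, check):
--     return {i: card.count(i) for i in check}
-- ===== Notes on version B (the rewrite author's own statement) =====
-- stated objective: simpler
-- what changed: B keeps no counting state at all: instead of seeding a dict with the check keys and conditionally incrementing while scanning the deck once, it answers each query directly with a full scan card.count(i) in a single comprehension over check.
import Mathlib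
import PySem

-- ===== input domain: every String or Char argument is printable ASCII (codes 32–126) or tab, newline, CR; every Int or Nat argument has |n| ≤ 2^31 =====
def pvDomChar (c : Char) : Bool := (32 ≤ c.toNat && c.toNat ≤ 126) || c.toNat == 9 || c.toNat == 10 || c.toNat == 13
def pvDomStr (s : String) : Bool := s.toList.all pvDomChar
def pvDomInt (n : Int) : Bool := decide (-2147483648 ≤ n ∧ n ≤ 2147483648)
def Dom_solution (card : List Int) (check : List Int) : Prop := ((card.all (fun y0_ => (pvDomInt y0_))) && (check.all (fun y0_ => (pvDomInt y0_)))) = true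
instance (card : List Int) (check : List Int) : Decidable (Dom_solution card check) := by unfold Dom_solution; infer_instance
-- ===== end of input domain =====

-- B keeps no counting state: it answers each check value by a direct scan of card (simpler, same result).

-- ===== PORT A =====
def solution (card : List Int) (check : List Int) : List (Int × Int) :=
  let collection : PySem.Dict Int Int :=
    check.foldl (fun d i => d.insert i 0) PySem.Dict.empty
  let collection :=
    card.foldl (fun d j => if d.contains j then d.modify j 0 (· + 1) else d) collection
  collection.items

-- ===== PORT B =====
def solution_alt (card : List Int) (check : List Int) : List (Int × Int) :=
  (check.foldl (fun d i => d.insert i (PySem.List.count card i)) PySem.Dict.empty).items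

-- ===== PRECONDITION & SPEC =====
def Spec_solution (card : List Int) (check : List Int) (out : List (Int × Int)) : Prop := out = solution_alt card check
instance (card : List Int) (check : List Int) (out : List (Int × Int)) : Decidable (Spec_solution card check out) := by unfold Spec_solution; infer_instance

-- ===== CLAIM (what is proved, stated in full; the proofs are below) =====
def Claim_equal_solution : Prop := ∀ (card : List Int) (check : List Int), Dom_solution card check → Spec_solution card check (solution card check)

-- ===== LEMMAS AND PROOFS =====

-- A's seed loop: every looked-up value is 0, and at a key in check the default is never used.
theorem seed_getD (check : List Int) (d : PySem.Dict Int Int) (k : Int) :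
    (check.foldl (fun d i => d.insert i 0) d).getD k 0
      = if k ∈ check then 0 else d.getD k 0 := by
  induction check generalizing d with
  | nil => simp
  | cons i rest ih =>
      simp only [List.foldl_cons, ih, PySem.Dict.getD_insert, List.mem_cons]
      split_ifs <;> simp_all

-- A's counting loop: keys are unchanged and each contained key gains its count in card.
theorem count_loop (card : List Int) (d : PySem.Dict Int Int) :
    (card.foldl (fun d j => if d.contains j then d.modify j 0 (· + 1) else d) d).keys = d.keys
    ∧ ∀ k, (card.foldl (fun d j => if d.contains j then d.modify j 0 (· + 1) else d) d).getD k 0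
        = d.getD k 0 + (if d.contains k then (card.count k : Int) else 0) := by
  induction card generalizing d with
  | nil => simp
  | cons j rest ih =>
      simp only [List.foldl_cons]
      by_cases hj : d.contains j = true
      · simp only [hj, if_true]
        obtain ⟨hk, hv⟩ := ih (d.modify j 0 (· + 1))
        refine ⟨by rw [hk]; simp [PySem.Dict.keys_modify, PySem.Dict.keys_insert_of_contains, hj], fun k => ?_⟩
        rw [hv k, PySem.Dict.contains_modify, PySem.Dict.getD_modify, List.count_cons]
        by_cases hkj : k = j
        · subst hkj; simp [hj]; ring
        · have hjk : ¬ j = k := fun h => hkj h.symm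
          simp [hkj, hjk]
      · simp only [Bool.not_eq_true] at hj
        simp only [hj, Bool.false_eq_true, if_false]
        obtain ⟨hk, hv⟩ := ih d
        refine ⟨hk, fun k => ?_⟩
        rw [hv k, List.count_cons]
        by_cases hck : d.contains k = true
        · have hkj : ¬ (k = j) := by rintro rfl; simp [hj] at hck
          have hjk : ¬ j = k := fun h => hkj h.symm
          simp [hck, hjk]
        · simp only [Bool.not_eq_true] at hck
          simp [hck]

-- B's loop: a key in check gets its looked-up value, independent of insertion repeats.
theorem bpass_getD (check : List Int) (f : Int → Int) (d : PySem.Dict Int Int) (k : Int) :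
    (check.foldl (fun d i => d.insert i (f i)) d).getD k 0
      = if k ∈ check then f k else d.getD k 0 := by
  induction check generalizing d with
  | nil => simp
  | cons i rest ih =>
      simp only [List.foldl_cons, ih, PySem.Dict.getD_insert, List.mem_cons]
      split_ifs <;> simp_all

-- ===== VERDICT (by name: the statement is the Claim_ definition above) =====
theorem solution_spec : Claim_equal_solution := by
  intro card check _
  show solution card check = solution_alt card check
  unfold solution solution_alt
  set seed : PySem.Dict Int Int := check.foldl (fun d i => d.insert i 0) PySem.Dict.empty with hseed
  set dA : PySem.Dict Int Int :=
    card.foldl (fun d j => if d.contains j then d.modify j 0 (· + 1) else d) seed with hdA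
  set dB : PySem.Dict Int Int :=
    check.foldl (fun d i => d.insert i (PySem.List.count card i)) PySem.Dict.empty with hdB
  obtain ⟨hAkeys, hAval⟩ := count_loop card seed
  have hseedkeys : seed.keys = PySem.Set.ofList check := by
    rw [hseed, PySem.Dict.keys_foldl_insert (f := fun _ _ => (0 : Int))]
    simp [PySem.Set.update_nil_left]
  have hBkeys : dB.keys = PySem.Set.ofList check := by
    rw [hdB, PySem.Dict.keys_foldl_insert (f := fun _ i => ((PySem.List.count card i : Int)))]
    simp [PySem.Set.update_nil_left]
  have hAk : dA.keys = PySem.Set.ofList check := by rw [hAkeys, hseedkeys]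
  have hAnd : dA.keys.Nodup := by rw [hAk]; exact PySem.Set.nodup_ofList check
  have hBnd : dB.keys.Nodup := by rw [hBkeys]; exact PySem.Set.nodup_ofList check
  rw [PySem.Dict.items_eq_map_keys dA hAnd 0, PySem.Dict.items_eq_map_keys dB hBnd 0,
      hAk, hBkeys]
  apply List.map_congr_left
  intro k hk
  have hkc : k ∈ check := (PySem.Set.mem_ofList check k).1 hk
  have hcontains : seed.contains k = true := by
    rw [PySem.Dict.contains_iff_mem_keys, hseedkeys]
    exact hk
  have hA : dA.getD k 0 = (card.count k : Int) := by
    rw [hAval k, hcontains, seed_getD, if_pos hkc]; simp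
  have hB : dB.getD k 0 = (card.count k : Int) := by
    rw [hdB, bpass_getD (f := fun i => ((PySem.List.count card i : Int))), if_pos hkc]
    simp [PySem.List.count_eq]
  rw [hA, hB]
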